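-- pv_equiv track=rewrite | github.com/Eastsky712/Coding-Problems | BaekjoonPractice/Silver/2630.py | check
-- ===== SOURCE A (Python) =====
-- def check(startX, startY, size, graph):
--     white = True
--     blue = True
--     for x in range(size):
--         for y in range(size):
--             if graph[startX + x][startY + y] == 0:
--                 blue = False
--             else:
--                 white = False
--             if blue == False and white == False:
--                 break
--         else:
--             continue
--         break
--     if white == True:
--         return 0
--     elif blue == True:
--         return 1
--     else:
--         return 2
-- ===== SOURCE B (Python) =====
-- def check(startX, startY, size, graph):
--     cells = [graph[startX + x][startY + y] for x in range(size) for y in range(size)]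
--     zeros = cells.count(0)
--     if zeros == len(cells):
--         return 0
--     if zeros == 0:
--         return 1
--     return 2
-- ===== Notes on version B (the rewrite author's own statement) =====
-- stated objective: simpler
-- what changed: Replaces the two early-exit boolean flags maintained over nested index loops by a single aggregate: collect the sub-region's cells, count the zeros, and classify the count against 0 and the cell total.
-- outside the precondition, e.g. on check(0, 0, 2, [[0, 1], [0]]): A returns 2, B raises IndexError
import Mathlib
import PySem

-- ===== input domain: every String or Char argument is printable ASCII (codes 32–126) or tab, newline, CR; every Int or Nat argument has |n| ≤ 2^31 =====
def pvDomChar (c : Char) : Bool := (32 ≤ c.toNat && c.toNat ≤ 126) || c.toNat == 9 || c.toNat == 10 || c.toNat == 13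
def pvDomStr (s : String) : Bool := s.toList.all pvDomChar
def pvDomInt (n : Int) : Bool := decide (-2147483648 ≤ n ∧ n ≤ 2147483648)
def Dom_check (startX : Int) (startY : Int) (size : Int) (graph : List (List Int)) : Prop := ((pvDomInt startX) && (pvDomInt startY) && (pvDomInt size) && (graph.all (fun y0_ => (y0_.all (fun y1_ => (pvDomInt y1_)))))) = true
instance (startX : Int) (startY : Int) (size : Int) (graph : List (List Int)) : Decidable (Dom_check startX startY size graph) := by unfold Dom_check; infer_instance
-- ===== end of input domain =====

-- ===== PORT A =====
-- B replaces A's two early-exit boolean flags with one aggregate: collect the scanned cells, count the zeros, classify the count (objective: simpler).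
-- Inner 'for y in range(size)' loop: returns (white, blue, broke).
def checkInner (graph : List (List Int)) (startX startY x : Int) :
    List Int → Bool → Bool → Bool × Bool × Bool
  | [], white, blue => (white, blue, false)
  | y :: ys, white, blue =>
    let v := PySem.List.pyGetD (PySem.List.pyGetD graph (startX + x) []) (startY + y) 0
    let wb : Bool × Bool := if v == 0 then (white, false) else (false, blue)
    if wb.2 == false && wb.1 == false then (wb.1, wb.2, true)
    else checkInner graph startX startY x ys wb.1 wb.2

-- Outer 'for x in range(size)' loop with the for/else/break pattern.
def checkOuter (graph : List (List Int)) (startX startY size : Int) :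
    List Int → Bool → Bool → Bool × Bool
  | [], white, blue => (white, blue)
  | x :: xs, white, blue =>
    let r := checkInner graph startX startY x (PySem.List.pyRange 0 size 1) white blue
    if r.2.2 then (r.1, r.2.1)
    else checkOuter graph startX startY size xs r.1 r.2.1

def check (startX : Int) (startY : Int) (size : Int) (graph : List (List Int)) : Int :=
  let r := checkOuter graph startX startY size (PySem.List.pyRange 0 size 1) true true
  if r.1 then 0 else if r.2 then 1 else 2

-- ===== PORT B =====
def check_alt (startX : Int) (startY : Int) (size : Int) (graph : List (List Int)) : Int :=
  let cells := (PySem.List.pyRange 0 size 1).flatMap (fun x =>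
    (PySem.List.pyRange 0 size 1).map (fun y =>
      PySem.List.pyGetD (PySem.List.pyGetD graph (startX + x) []) (startY + y) 0))
  let zeros := PySem.List.count cells 0
  if zeros == cells.length then 0 else if zeros == 0 then 1 else 2

-- ===== PRECONDITION & SPEC =====
-- Pre_ excludes inputs whose size*size scan window contains a Python-unindexable cell: there A either
-- raises IndexError or returns 2 only because its early exit accidentally stops before the bad index.
-- (A row with Python index i is read iff the window [startX, startX+size) covers i or i - len(graph).)
def Pre_check (startX : Int) (startY : Int) (size : Int) (graph : List (List Int)) : Prop :=
  size ≤ 0 ∨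
    (-(graph.length : Int) ≤ startX ∧ startX + size ≤ (graph.length : Int) ∧
      ∀ p ∈ PySem.List.enumerate graph 0,
        ((startX ≤ p.1 ∧ p.1 < startX + size) ∨
         (startX ≤ p.1 - graph.length ∧ p.1 - graph.length < startX + size)) →
          (-(p.2.length : Int) ≤ startY ∧ startY + size ≤ (p.2.length : Int)))
instance (startX : Int) (startY : Int) (size : Int) (graph : List (List Int)) : Decidable (Pre_check startX startY size graph) := by unfold Pre_check; infer_instance

def pvWitness_check : Int × Int × Int × List (List Int) := (0, 1, 2, [[5, 0, 1], [2, 1, 0]])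

def Spec_check (startX : Int) (startY : Int) (size : Int) (graph : List (List Int)) (out : Int) : Prop := out = check_alt startX startY size graph
instance (startX : Int) (startY : Int) (size : Int) (graph : List (List Int)) (out : Int) : Decidable (Spec_check startX startY size graph out) := by unfold Spec_check; infer_instance

-- ===== CLAIM (what is proved, stated in full; the proofs are below) =====
def Claim_equal_check : Prop := ∀ (startX : Int) (startY : Int) (size : Int) (graph : List (List Int)), Dom_check startX startY size graph → Pre_check startX startY size graph → Spec_check startX startY size graph (check startX startY size graph)

-- ===== LEMMAS AND PROOFS =====

-- the cell value A reads at offsets (x, y)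
def cellA (graph : List (List Int)) (startX startY x y : Int) : Int :=
  PySem.List.pyGetD (PySem.List.pyGetD graph (startX + x) []) (startY + y) 0

lemma checkInner_fst (graph : List (List Int)) (startX startY x : Int) (ys : List Int)
    (w b : Bool) :
    (checkInner graph startX startY x ys w b).1
      = (w && ys.all (fun y => cellA graph startX startY x y == 0)) := by
  induction ys generalizing w b with
  | nil => simp [checkInner]
  | cons y ys ih =>
    simp only [checkInner, cellA, List.all_cons]
    by_cases hv : PySem.List.pyGetD (PySem.List.pyGetD graph (startX + x) []) (startY + y) 0 = 0 <;>
      simp [hv] <;> split_ifs with hb <;> simp_all [cellA]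

lemma checkInner_snd (graph : List (List Int)) (startX startY x : Int) (ys : List Int)
    (w b : Bool) :
    (checkInner graph startX startY x ys w b).2.1
      = (b && ys.all (fun y => !(cellA graph startX startY x y == 0))) := by
  induction ys generalizing w b with
  | nil => simp [checkInner]
  | cons y ys ih =>
    simp only [checkInner, cellA, List.all_cons]
    by_cases hv : PySem.List.pyGetD (PySem.List.pyGetD graph (startX + x) []) (startY + y) 0 = 0 <;>
      simp [hv] <;> split_ifs with hb <;> simp_all [cellA]

lemma checkInner_broke (graph : List (List Int)) (startX startY x : Int) (ys : List Int)
    (w b : Bool) (h : (checkInner graph startX startY x ys w b).2.2 = true) :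
    (checkInner graph startX startY x ys w b).1 = false ∧
      (checkInner graph startX startY x ys w b).2.1 = false := by
  induction ys generalizing w b with
  | nil => simp [checkInner] at h
  | cons y ys ih =>
    simp only [checkInner] at h ⊢
    by_cases hv : PySem.List.pyGetD (PySem.List.pyGetD graph (startX + x) []) (startY + y) 0 = 0 <;>
      simp [hv] at h ⊢ <;> split_ifs with hb <;> simp_all

lemma checkOuter_eq (graph : List (List Int)) (startX startY size : Int) (xs : List Int)
    (w b : Bool) :
    checkOuter graph startX startY size xs w b
      = (w && xs.all (fun x => (PySem.List.pyRange 0 size 1).all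
            (fun y => cellA graph startX startY x y == 0)),
         b && xs.all (fun x => (PySem.List.pyRange 0 size 1).all
            (fun y => !(cellA graph startX startY x y == 0)))) := by
  induction xs generalizing w b with
  | nil => simp [checkOuter]
  | cons x xs ih =>
    simp only [checkOuter, List.all_cons]
    split_ifs with hbr
    · obtain ⟨h1, h2⟩ := checkInner_broke graph startX startY x _ w b hbr
      rw [checkInner_fst] at h1
      rw [checkInner_snd] at h2
      rw [Prod.mk_inj]
      constructor
      · rw [checkInner_fst, h1, ← Bool.and_assoc, h1, Bool.false_and]
      · rw [checkInner_snd, h2, ← Bool.and_assoc, h2, Bool.false_and]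
    · rw [ih, checkInner_fst, checkInner_snd, Bool.and_assoc, Bool.and_assoc]

-- ===== VERDICT (by name: the statement is the Claim_ definition above) =====
theorem check_spec : Claim_equal_check := by
  unfold Claim_equal_check
  intro startX startY size graph _ _
  unfold Spec_check check check_alt
  rw [checkOuter_eq]
  simp only [Bool.true_and]
  set R := PySem.List.pyRange 0 size 1 with hR
  set cells := R.flatMap (fun x => R.map (fun y =>
    PySem.List.pyGetD (PySem.List.pyGetD graph (startX + x) []) (startY + y) 0)) with hc
  have hmem : ∀ c : Int, c ∈ cells ↔ ∃ x ∈ R, ∃ y ∈ R, c = cellA graph startX startY x y := by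
    intro c
    simp only [hc, List.mem_flatMap, List.mem_map, cellA]
    constructor
    · rintro ⟨x, hx, y, hy, rfl⟩
      exact ⟨x, hx, y, hy, rfl⟩
    · rintro ⟨x, hx, y, hy, rfl⟩
      exact ⟨x, hx, y, hy, rfl⟩
  have hAZ : (R.all (fun x => R.all (fun y => cellA graph startX startY x y == 0)) = true)
      ↔ PySem.List.count cells 0 = cells.length := by
    rw [PySem.List.count_eq, List.count_eq_length]
    simp only [List.all_eq_true, beq_iff_eq]
    constructor
    · intro h c hcm
      obtain ⟨x, hx, y, hy, rfl⟩ := (hmem c).1 hcm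
      exact (h x hx y hy).symm
    · intro h x hx y hy
      exact (h _ ((hmem _).2 ⟨x, hx, y, hy, rfl⟩)).symm
  have hAN : (R.all (fun x => R.all (fun y => !(cellA graph startX startY x y == 0))) = true)
      ↔ PySem.List.count cells 0 = 0 := by
    rw [PySem.List.count_eq, List.count_eq_zero]
    simp only [List.all_eq_true, Bool.not_eq_eq_eq_not, Bool.not_true, beq_eq_false_iff_ne, ne_eq]
    constructor
    · intro h hcm
      obtain ⟨x, hx, y, hy, he⟩ := (hmem 0).1 hcm
      exact h x hx y hy he.symm
    · intro h x hx y hy he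
      exact h ((hmem 0).2 ⟨x, hx, y, hy, he.symm⟩)
  split_ifs with h1 h2 h3 h4 <;>
    first
      | rfl
      | (exfalso
         simp only [beq_iff_eq] at *
         tauto)
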